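-- pv_equiv track=rewrite | github.com/debu-sinha/inspect-mlflow | inspect_mlflow/tracking.py | _rows_to_columns
-- ===== SOURCE A (Python) =====
-- from typing import Any
--
-- def _rows_to_columns(rows: list[dict[str, Any]]) -> dict[str, list[Any]]:
--     columns: dict[str, list[Any]] = {}
--     for row in rows:
--         for key in row:
--             columns.setdefault(str(key), [])
--     for row in rows:
--         for key in columns:
--             columns[key].append(row.get(key))
--     return columns
-- ===== SOURCE B (Python) =====
-- def _rows_to_columns(rows):
--     columns = {}
--     n = 0
--     for row in rows:
--         for key in row:
--             columns.setdefault(str(key), [None] * n)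
--         for col_key in columns:
--             columns[col_key].append(row.get(col_key))
--         n += 1
--     return columns
-- ===== Notes on version B (the rewrite author's own statement) =====
-- stated objective: alternative
-- what changed: B replaces A's two full passes over rows (first collect all column keys, then fill every column) by a single streaming pass that keeps a row count and backfills a newly discovered column with None for all earlier rows.
import Mathlib
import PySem

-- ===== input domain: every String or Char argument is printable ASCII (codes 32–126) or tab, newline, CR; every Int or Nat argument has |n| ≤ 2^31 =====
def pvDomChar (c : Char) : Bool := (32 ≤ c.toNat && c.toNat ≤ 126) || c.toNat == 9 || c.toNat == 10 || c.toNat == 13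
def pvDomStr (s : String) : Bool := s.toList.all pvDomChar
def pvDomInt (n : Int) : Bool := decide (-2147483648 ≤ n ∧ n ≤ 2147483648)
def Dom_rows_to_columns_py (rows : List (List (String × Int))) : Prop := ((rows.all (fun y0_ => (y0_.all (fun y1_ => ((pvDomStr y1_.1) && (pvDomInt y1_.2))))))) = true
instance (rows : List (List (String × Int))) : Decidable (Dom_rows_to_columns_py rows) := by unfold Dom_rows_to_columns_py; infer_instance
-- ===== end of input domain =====

-- B converts the rows in ONE streaming pass (row count + None backfill for newly
-- discovered columns) instead of A's two full passes over the rows.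

-- ===== PORT A =====
-- rows are Python dicts: a row list is read through PySem.Dict.ofList (last duplicate wins,
-- first-occurrence key order), 'for key in row' is .keys, 'row.get(key)' is .get?;
-- str(key) on a str key is the key itself.
def rows_to_columns_py (rows : List (List (String × Int))) : List (String × List (Option Int)) :=
  let columns : PySem.Dict String (List (Option Int)) :=
    rows.foldl (fun columns row =>
      (PySem.Dict.ofList row).keys.foldl (fun columns key =>
        columns.setdefault key []) columns) PySem.Dict.empty
  let columns :=
    rows.foldl (fun columns row =>
      columns.keys.foldl (fun columns key =>
        columns.modify key [] (fun v => v ++ [(PySem.Dict.ofList row).get? key])) columns) columns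
  columns.items

-- ===== PORT B =====
def rows_to_columns_py_alt (rows : List (List (String × Int))) : List (String × List (Option Int)) :=
  (rows.foldl (fun (st : Nat × PySem.Dict String (List (Option Int))) row =>
      let r := PySem.Dict.ofList row
      let columns := r.keys.foldl (fun columns key =>
        columns.setdefault key (List.replicate st.1 none)) st.2
      let columns := columns.keys.foldl (fun columns key =>
        columns.modify key [] (fun v => v ++ [r.get? key])) columns
      (st.1 + 1, columns)) (0, PySem.Dict.empty)).2.items

-- ===== PRECONDITION & SPEC =====
def Spec_rows_to_columns_py (rows : List (List (String × Int))) (out : List (String × List (Option Int))) : Prop := out = rows_to_columns_py_alt rows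
instance (rows : List (List (String × Int))) (out : List (String × List (Option Int))) : Decidable (Spec_rows_to_columns_py rows out) := by unfold Spec_rows_to_columns_py; infer_instance

-- ===== CLAIM (what is proved, stated in full; the proofs are below) =====
def Claim_equal_rows_to_columns_py : Prop := ∀ (rows : List (List (String × Int))), Dom_rows_to_columns_py rows → Spec_rows_to_columns_py rows (rows_to_columns_py rows)

-- ===== LEMMAS AND PROOFS =====

-- keys of `ks` not yet in `seen`, in first-occurrence order (what a setdefault loop appends)
def pvFresh (seen ks : List String) : List String :=
  match ks with
  | [] => []
  | k :: ks => if k ∈ seen then pvFresh seen ks else k :: pvFresh (seen ++ [k]) ks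

-- the column-key list accumulated over `rows` starting from `K0`
def pvCK (K0 : List String) (rows : List (List (String × Int))) : List String :=
  rows.foldl (fun acc row => acc ++ pvFresh acc (PySem.Dict.ofList row).keys) K0

-- value row.get(k)
def pvG (row : List (String × Int)) (k : String) : Option Int :=
  (PySem.Dict.ofList row).get? k

lemma mem_pvFresh (seen ks : List String) (x : String) :
    x ∈ pvFresh seen ks ↔ x ∈ ks ∧ x ∉ seen := by
  induction ks generalizing seen with
  | nil => simp [pvFresh]
  | cons k ks ih =>
    by_cases hk : k ∈ seen
    · simp only [pvFresh, if_pos hk, ih, List.mem_cons]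
      constructor
      · rintro ⟨h1, h2⟩; exact ⟨Or.inr h1, h2⟩
      · rintro ⟨h1 | h1, h2⟩
        · exact absurd (h1 ▸ hk) h2
        · exact ⟨h1, h2⟩
    · simp only [pvFresh, if_neg hk, List.mem_cons, ih, List.mem_append]
      constructor
      · rintro (rfl | ⟨h1, h2⟩)
        · exact ⟨Or.inl rfl, hk⟩
        · exact ⟨Or.inr h1, fun hx => h2 (Or.inl hx)⟩
      · rintro ⟨rfl | h1, h2⟩
        · exact Or.inl rfl
        · by_cases hxk : x = k
          · exact Or.inl hxk
          · exact Or.inr ⟨h1, by simp [h2, hxk]⟩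

lemma nodup_append_pvFresh (seen ks : List String) (h : seen.Nodup) :
    (seen ++ pvFresh seen ks).Nodup := by
  induction ks generalizing seen with
  | nil => simpa [pvFresh]
  | cons k ks ih =>
    by_cases hk : k ∈ seen
    · have e : pvFresh seen (k :: ks) = pvFresh seen ks := by
        simp only [pvFresh, if_pos hk]
      rw [e]; exact ih seen h
    · have e : pvFresh seen (k :: ks) = k :: pvFresh (seen ++ [k]) ks := by
        simp only [pvFresh, if_neg hk]
      rw [e, List.append_cons]
      refine ih (seen ++ [k]) ?_
      rw [List.nodup_append]
      refine ⟨h, List.nodup_singleton _, ?_⟩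
      intro x hx y hy
      rw [List.mem_singleton] at hy
      subst hy
      exact fun hxy => hk (hxy ▸ hx)

-- a setdefault loop appends exactly the fresh keys, all with value v0
lemma sd_loop (ks : List String) (d : PySem.Dict String (List (Option Int)))
    (v0 : List (Option Int)) :
    (ks.foldl (fun d k => d.setdefault k v0) d).items
      = d.items ++ (pvFresh d.keys ks).map (fun k => (k, v0)) := by
  induction ks generalizing d with
  | nil => simp [pvFresh]
  | cons k ks ih =>
    rw [List.foldl_cons]
    by_cases hk : k ∈ d.keys
    · have hc : d.contains k = true := by
        rw [PySem.Dict.contains_eq_decide_mem_keys]; simpa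
      rw [show d.setdefault k v0 = d from by simp [PySem.Dict.setdefault, hc]]
      rw [ih]
      simp [pvFresh, hk]
    · have hc : d.contains k = false := by
        rw [PySem.Dict.contains_eq_decide_mem_keys]; simpa
      rw [show d.setdefault k v0
            = (PySem.Dict.mk (d.items ++ [(k, v0)]) : PySem.Dict String (List (Option Int)))
          from by simp [PySem.Dict.setdefault, hc]]
      rw [ih]
      have hk' : k ∉ List.map (fun x => x.1) d.items := by
        simpa [PySem.Dict.keys] using hk
      simp [pvFresh, PySem.Dict.keys, if_neg hk']

-- modify on a present key (unique keys) rewrites exactly that entry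
lemma modify_items (d : PySem.Dict String (List (Option Int))) (k : String)
    (dflt : List (Option Int)) (f : List (Option Int) → List (Option Int))
    (hk : k ∈ d.keys) (hnd : d.keys.Nodup) :
    (d.modify k dflt f).items = d.items.map (fun p => if p.1 = k then (k, f p.2) else p) := by
  have hc : d.contains k = true := by
    rw [PySem.Dict.contains_eq_decide_mem_keys]; simpa
  show (d.insert k (f (d.getD k dflt))).items = _
  rw [PySem.Dict.items_insert, if_pos hc]
  apply List.map_congr_left
  intro p hp
  by_cases hpk : p.1 = k
  · have hmem : (k, p.2) ∈ d.items := by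
      have hpe : p = (k, p.2) := by
        obtain ⟨a, b⟩ := p; simp_all
      rw [← hpe]; exact hp
    have hg : d.getD k dflt = p.2 := PySem.Dict.getD_of_mem_items d hmem hnd dflt
    simp [hpk, hg]
  · simp [hpk]

-- a dict whose items list is d's with first components preserved has d's keys
lemma keys_eq_of_items_map (d' d : PySem.Dict String (List (Option Int)))
    (g : String × List (Option Int) → String × List (Option Int))
    (h : d'.items = d.items.map g) (hg : ∀ p, (g p).1 = p.1) : d'.keys = d.keys := by
  show List.map (fun x => x.1) d'.items = List.map (fun x => x.1) d.items
  rw [h, List.map_map]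
  apply List.map_congr_left
  intro p _
  exact hg p

-- a dict whose items list is K.map (fun k => (k, F k)) has keys K
lemma keys_of_items_map_key (d' : PySem.Dict String (List (Option Int)))
    (K : List String) (F : String → List (Option Int))
    (h : d'.items = K.map (fun k => (k, F k))) : d'.keys = K := by
  show List.map (fun x => x.1) d'.items = K
  rw [h, List.map_map]
  have he : ((fun x => x.1) ∘ fun k => (k, F k)) = fun k => k := rfl
  rw [he]
  simp

-- the inner 'for key in columns: columns[key].append(…)' loop, generalized
lemma modify_loop (h : String → Option Int) (ks : List String) :
    ∀ (d : PySem.Dict String (List (Option Int))), d.keys.Nodup → ks.Nodup →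
    (∀ k ∈ ks, k ∈ d.keys) →
    (ks.foldl (fun d k => d.modify k [] (fun v => v ++ [h k])) d).items
      = d.items.map (fun p => if p.1 ∈ ks then (p.1, p.2 ++ [h p.1]) else p) := by
  induction ks with
  | nil => intro d _ _ _; simp
  | cons k ks ih =>
    intro d hnd hks hsub
    rw [List.foldl_cons]
    have hk : k ∈ d.keys := hsub k (by simp)
    have hitems := modify_items d k [] (fun v => v ++ [h k]) hk hnd
    have hkeys : (d.modify k [] (fun v => v ++ [h k])).keys = d.keys :=
      keys_eq_of_items_map _ d _ hitems
        (fun p => by by_cases hpk : p.1 = k <;> simp [hpk])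
    have hnd' : (d.modify k [] (fun v => v ++ [h k])).keys.Nodup := by
      rw [hkeys]; exact hnd
    have hknotks : k ∉ ks := (List.nodup_cons.mp hks).1
    rw [ih _ hnd' (List.nodup_cons.mp hks).2
        (fun x hx => by rw [hkeys]; exact hsub x (by simp [hx]))]
    rw [hitems, List.map_map]
    apply List.map_congr_left
    intro p hp
    by_cases hpk : p.1 = k
    · simp [Function.comp, hpk, hknotks]
    · by_cases hpks : p.1 ∈ ks <;> simp [Function.comp, hpk, hpks]

lemma append_row (row : List (String × Int)) (d : PySem.Dict String (List (Option Int)))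
    (hnd : d.keys.Nodup) :
    (d.keys.foldl (fun d k => d.modify k [] (fun v => v ++ [pvG row k])) d).items
      = d.items.map (fun p => (p.1, p.2 ++ [pvG row p.1])) := by
  rw [modify_loop (pvG row) d.keys d hnd hnd (fun k hk => hk)]
  apply List.map_congr_left
  intro p hp
  have hpk : p.1 ∈ d.keys := by
    simpa [PySem.Dict.keys] using List.mem_map_of_mem hp (f := fun x => x.1)
  simp [hpk]

-- A's second pass, closed form
lemma pass2 (rows : List (List (String × Int))) :
    ∀ (d : PySem.Dict String (List (Option Int))), d.keys.Nodup →
    (rows.foldl (fun d row =>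
        d.keys.foldl (fun d k => d.modify k [] (fun v => v ++ [pvG row k])) d) d).items
      = d.items.map (fun p => (p.1, p.2 ++ rows.map (fun row => pvG row p.1))) := by
  induction rows with
  | nil => intro d _; simp
  | cons row rows ih =>
    intro d hnd
    rw [List.foldl_cons]
    have hitems := append_row row d hnd
    have hkeys : (d.keys.foldl (fun d k => d.modify k [] (fun v => v ++ [pvG row k])) d).keys
        = d.keys :=
      keys_eq_of_items_map _ d _ hitems (fun p => rfl)
    rw [ih _ (by rw [hkeys]; exact hnd), hitems, List.map_map]
    apply List.map_congr_left
    intro p hp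
    simp [Function.comp]

-- A's first pass, closed form
lemma pass1 (rows : List (List (String × Int))) :
    ∀ (K0 : List String) (d : PySem.Dict String (List (Option Int))),
    d.items = K0.map (fun k => (k, ([] : List (Option Int)))) →
    (rows.foldl (fun d row =>
        (PySem.Dict.ofList row).keys.foldl (fun d k => d.setdefault k []) d) d).items
      = (pvCK K0 rows).map (fun k => (k, ([] : List (Option Int)))) := by
  induction rows with
  | nil => intro K0 d hd; simpa [pvCK]
  | cons row rows ih =>
    intro K0 d hd
    rw [List.foldl_cons]
    have hkeys : d.keys = K0 := keys_of_items_map_key d K0 _ hd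
    have hd1 : ((PySem.Dict.ofList row).keys.foldl (fun d k => d.setdefault k []) d).items
        = (K0 ++ pvFresh K0 (PySem.Dict.ofList row).keys).map
            (fun k => (k, ([] : List (Option Int)))) := by
      rw [sd_loop, hd, hkeys, List.map_append]
    rw [ih _ _ hd1]
    rfl

lemma nodup_pvCK (rows : List (List (String × Int))) :
    ∀ (K0 : List String), K0.Nodup → (pvCK K0 rows).Nodup := by
  induction rows with
  | nil => intro K0 h; simpa [pvCK]
  | cons row rows ih =>
    intro K0 h
    exact ih _ (nodup_append_pvFresh _ _ h)

lemma mem_pvCK (rows : List (List (String × Int))) (x : String) :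
    ∀ (K0 : List String), x ∈ pvCK K0 rows ↔
      x ∈ K0 ∨ ∃ row ∈ rows, x ∈ (PySem.Dict.ofList row).keys := by
  induction rows with
  | nil => intro K0; simp [pvCK]
  | cons row rows ih =>
    intro K0
    rw [show pvCK K0 (row :: rows)
          = pvCK (K0 ++ pvFresh K0 (PySem.Dict.ofList row).keys) rows from rfl, ih]
    by_cases hx : x ∈ K0 <;> simp [hx, mem_pvFresh]

lemma pvG_eq_none (row : List (String × Int)) (k : String)
    (h : k ∉ (PySem.Dict.ofList row).keys) : pvG row k = none := by
  unfold pvG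
  rw [PySem.Dict.get?_eq_none_iff_not_mem_keys]
  exact h

-- the dict built by A's first loop, named for the proofs (definitionally the port's first foldl)
def pvA1 (rows : List (List (String × Int))) : PySem.Dict String (List (Option Int)) :=
  rows.foldl (fun columns row =>
    (PySem.Dict.ofList row).keys.foldl (fun columns key =>
      columns.setdefault key []) columns) PySem.Dict.empty

-- closed form for A
lemma a_closed (rows : List (List (String × Int))) :
    rows_to_columns_py rows
      = (pvCK [] rows).map (fun k => (k, rows.map (fun row => pvG row k))) := by
  have h1 : (pvA1 rows).items = (pvCK [] rows).map (fun k => (k, ([] : List (Option Int)))) :=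
    pass1 rows [] PySem.Dict.empty rfl
  have hkeys : (pvA1 rows).keys = pvCK [] rows := keys_of_items_map_key _ _ _ h1
  have hnd : (pvA1 rows).keys.Nodup := by
    rw [hkeys]; exact nodup_pvCK rows [] List.nodup_nil
  have h2 := pass2 rows (pvA1 rows) hnd
  simp only [pvG] at h2
  show (rows.foldl (fun (columns : PySem.Dict String (List (Option Int))) row =>
      columns.keys.foldl (fun columns key =>
        columns.modify key [] (fun v => v ++ [(PySem.Dict.ofList row).get? key])) columns)
      (pvA1 rows)).items = _
  rw [h2, h1, List.map_map]
  apply List.map_congr_left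
  intro k _
  simp [pvG]

-- B's step function, named for the proofs (definitionally the foldl body of the port of B)
def pvBstep (st : Nat × PySem.Dict String (List (Option Int))) (row : List (String × Int)) :
    Nat × PySem.Dict String (List (Option Int)) :=
  let r := PySem.Dict.ofList row
  let columns := r.keys.foldl (fun columns key =>
    columns.setdefault key (List.replicate st.1 none)) st.2
  let columns := columns.keys.foldl (fun columns key =>
    columns.modify key [] (fun v => v ++ [r.get? key])) columns
  (st.1 + 1, columns)

-- the dict built by B's setdefault loop for one row, named for the proofs
def pvBsd (n : Nat) (d : PySem.Dict String (List (Option Int)))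
    (row : List (String × Int)) : PySem.Dict String (List (Option Int)) :=
  (PySem.Dict.ofList row).keys.foldl (fun d k => d.setdefault k (List.replicate n none)) d

-- closed form for B's streaming state (snoc induction)
lemma b_state (rows : List (List (String × Int))) :
    (rows.foldl pvBstep (0, PySem.Dict.empty)).1 = rows.length
    ∧ (rows.foldl pvBstep (0, PySem.Dict.empty)).2.items
        = (pvCK [] rows).map (fun k => (k, rows.map (fun row => pvG row k))) := by
  induction rows using List.reverseRecOn with
  | nil => exact ⟨rfl, rfl⟩
  | append_singleton rows row ih =>
    obtain ⟨ih1, ih2⟩ := ih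
    rw [List.foldl_append]
    set st := rows.foldl pvBstep (0, PySem.Dict.empty) with hst
    have hkeys : st.2.keys = pvCK [] rows := keys_of_items_map_key _ _ _ ih2
    have hndK : (pvCK [] rows).Nodup := nodup_pvCK rows [] List.nodup_nil
    have hsd : (pvBsd st.1 st.2 row).items
        = st.2.items ++ (pvFresh st.2.keys (PySem.Dict.ofList row).keys).map
            (fun k => (k, List.replicate st.1 none)) :=
      sd_loop (PySem.Dict.ofList row).keys st.2 (List.replicate st.1 none)
    -- rewrite the backfill values: a fresh key was absent from every earlier row
    have hfresh : (pvFresh st.2.keys (PySem.Dict.ofList row).keys).map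
          (fun k => (k, List.replicate st.1 none))
        = (pvFresh (pvCK [] rows) (PySem.Dict.ofList row).keys).map
          (fun k => (k, rows.map (fun row' => pvG row' k))) := by
      rw [hkeys]
      apply List.map_congr_left
      intro k hk
      have hnotCK : k ∉ pvCK [] rows := ((mem_pvFresh _ _ k).mp hk).2
      have hvals : rows.map (fun row' => pvG row' k) = List.replicate st.1 none := by
        rw [List.eq_replicate_iff]
        refine ⟨by simp [ih1], ?_⟩
        intro b hb
        obtain ⟨row', hrow', hbe⟩ := List.mem_map.mp hb
        rw [← hbe]
        apply pvG_eq_none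
        intro hkmem
        exact hnotCK ((mem_pvCK rows k []).mpr (Or.inr ⟨row', hrow', hkmem⟩))
      rw [hvals]
    have hsd' : (pvBsd st.1 st.2 row).items
        = (pvCK [] rows ++ pvFresh (pvCK [] rows) (PySem.Dict.ofList row).keys).map
          (fun k => (k, rows.map (fun row' => pvG row' k))) := by
      rw [hsd, hfresh, ih2, List.map_append]
    have hkeys' : (pvBsd st.1 st.2 row).keys
        = pvCK [] rows ++ pvFresh (pvCK [] rows) (PySem.Dict.ofList row).keys :=
      keys_of_items_map_key _ _ _ hsd'
    have hnd' : (pvBsd st.1 st.2 row).keys.Nodup := by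
      rw [hkeys']
      exact nodup_append_pvFresh _ _ hndK
    have hap := append_row row (pvBsd st.1 st.2 row) hnd'
    simp only [pvG] at hap
    constructor
    · have h1 : (List.foldl pvBstep st [row]).1 = st.1 + 1 := rfl
      rw [h1, ih1]
      simp
    · have h2 : (List.foldl pvBstep st [row]).2.items
          = ((pvBsd st.1 st.2 row).keys.foldl
              (fun (d : PySem.Dict String (List (Option Int))) k =>
                d.modify k [] (fun v => v ++ [(PySem.Dict.ofList row).get? k]))
              (pvBsd st.1 st.2 row)).items := rfl
      rw [h2, hap, hsd', List.map_map]
      rw [show pvCK [] (rows ++ [row])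
            = pvCK [] rows ++ pvFresh (pvCK [] rows) (PySem.Dict.ofList row).keys from by
          simp [pvCK, List.foldl_append]]
      apply List.map_congr_left
      intro k _
      simp [pvG, List.map_append]

-- ===== VERDICT (by name: the statement is the Claim_ definition above) =====
theorem rows_to_columns_py_spec : Claim_equal_rows_to_columns_py := by
  intro rows _
  unfold Spec_rows_to_columns_py
  rw [a_closed]
  show (pvCK [] rows).map (fun k => (k, rows.map (fun row => pvG row k)))
      = (rows.foldl pvBstep (0, PySem.Dict.empty)).2.items
  rw [(b_state rows).2]
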